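-- pv_equiv track=rewrite | github.com/Paralipupa/smart-parser | preliminary/utils.py | get_reg
-- ===== SOURCE A (Python) =====
-- def get_reg(pattern: str) -> str:
--     new_pattern = ''
--     for patt in pattern.split(";"):
--         if patt and not patt[0] in ("+-("):
--             patt = patt.replace("\\", "\\\\").replace("/", "\/")
--             patt = patt.replace("[", "\[").replace("]", "\]")
--             patt = patt.replace("(", "\(").replace(")", "\)")
--             patt = patt.replace(".", "[.]").replace("*", "[*]")
--             patt = patt.replace("+", "[+]").replace("_", "")
--         new_pattern += (patt + ";")
--     new_pattern = new_pattern.strip(";").strip()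
--     return (
--         f'^{new_pattern.rstrip().replace(";","$;^")}$'
--         if new_pattern.find("^") == -1 and new_pattern.find("$") == -1
--         else new_pattern.rstrip()
--     )
-- ===== SOURCE B (Python) =====
-- _ESC = {'\\': '\\\\', '/': '\\/', '[': '\\[', ']': '\\]', '(': '\\(', ')': '\\)',
--         '.': '[.]', '*': '[*]', '+': '[+]', '_': ''}
--
--
-- def get_reg(pattern: str) -> str:
--     # single left-to-right pass: a tiny state machine instead of split/escape/rejoin
--     out = []
--     start, exempt = True, False   # start: at the beginning of a ';'-segment
--     for c in pattern:
--         if c == ';':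
--             out.append(';')
--             start, exempt = True, False
--             continue
--         if start:
--             exempt = c in '+-('
--             start = False
--         out.append(c if exempt else _ESC.get(c, c))
--     s = ''.join(out).strip(';').strip()
--     if '^' in s or '$' in s:
--         return s
--     return '^' + s.replace(';', '$;^') + '$'
-- ===== Notes on version B (the rewrite author's own statement) =====
-- stated objective: alternative
-- what changed: Replaces A's split-into-segments / ten-replace-passes-per-segment / rejoin pipeline with a single left-to-right state-machine pass over the whole string that tracks segment-start and exempt flags and emits each character's escape directly.
import Mathlib
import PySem

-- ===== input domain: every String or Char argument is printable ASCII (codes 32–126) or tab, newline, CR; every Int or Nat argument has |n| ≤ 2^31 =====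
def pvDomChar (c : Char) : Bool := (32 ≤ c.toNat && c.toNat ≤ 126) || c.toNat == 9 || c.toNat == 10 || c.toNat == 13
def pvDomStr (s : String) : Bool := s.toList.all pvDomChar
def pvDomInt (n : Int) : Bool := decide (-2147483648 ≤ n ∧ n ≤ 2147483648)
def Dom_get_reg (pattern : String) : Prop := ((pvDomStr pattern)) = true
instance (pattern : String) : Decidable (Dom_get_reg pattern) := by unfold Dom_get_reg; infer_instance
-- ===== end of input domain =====

-- B replaces A's split / ten-replace-passes-per-segment / rejoin pipeline with one left-to-right
-- state-machine pass that tracks segment-start/exempt flags and emits each char's escape directly.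

-- ===== PORT A =====
-- the ten chained .replace() calls of A, in A's order
def getRegEscA (p : List Char) : List Char :=
  let p := PySem.Chars.replace p ['\\'] ['\\', '\\']
  let p := PySem.Chars.replace p ['/'] ['\\', '/']
  let p := PySem.Chars.replace p ['['] ['\\', '[']
  let p := PySem.Chars.replace p [']'] ['\\', ']']
  let p := PySem.Chars.replace p ['('] ['\\', '(']
  let p := PySem.Chars.replace p [')'] ['\\', ')']
  let p := PySem.Chars.replace p ['.'] ['[', '.', ']']
  let p := PySem.Chars.replace p ['*'] ['[', '*', ']']
  let p := PySem.Chars.replace p ['+'] ['[', '+', ']']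
  PySem.Chars.replace p ['_'] []

def get_reg (pattern : String) : String :=
  let new_pattern :=
    (PySem.Chars.splitOn pattern.toList [';']).foldl
      (fun new_pattern patt =>
        new_pattern ++
          ((if !patt.isEmpty && !(['+', '-', '('].contains patt.headI)
            then getRegEscA patt else patt) ++ [';'])) []
  let np := PySem.Chars.strip (PySem.Chars.stripChars new_pattern [';'])
  if PySem.Chars.find np ['^'] = -1 ∧ PySem.Chars.find np ['$'] = -1 then
    String.ofList ('^' :: PySem.Chars.replace (PySem.Chars.rstrip np) [';'] ['$', ';', '^'] ++ ['$'])
  else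
    String.ofList (PySem.Chars.rstrip np)

-- ===== PORT B =====
-- B's _ESC table: _ESC.get(c, c) as a List Char result ('' for '_')
def getRegEscB (c : Char) : List Char :=
  if c = '\\' then ['\\', '\\']
  else if c = '/' then ['\\', '/']
  else if c = '[' then ['\\', '[']
  else if c = ']' then ['\\', ']']
  else if c = '(' then ['\\', '(']
  else if c = ')' then ['\\', ')']
  else if c = '.' then ['[', '.', ']']
  else if c = '*' then ['[', '*', ']']
  else if c = '+' then ['[', '+', ']']
  else if c = '_' then []
  else [c]

-- B's for-loop: one pass with state (start, exempt); structural recursion on the remaining chars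
def getRegGoB (l : List Char) (start exempt : Bool) : List Char :=
  match l with
  | [] => []
  | c :: t =>
    if c = ';' then ';' :: getRegGoB t true false
    else
      let exempt' := if start then ['+', '-', '('].contains c else exempt
      (if exempt' then [c] else getRegEscB c) ++ getRegGoB t false exempt'

def get_reg_alt (pattern : String) : String :=
  let s := PySem.Chars.strip (PySem.Chars.stripChars (getRegGoB pattern.toList true false) [';'])
  if PySem.Chars.isIn ['^'] s || PySem.Chars.isIn ['$'] s then
    String.ofList s
  else
    String.ofList ('^' :: PySem.Chars.replace s [';'] ['$', ';', '^'] ++ ['$'])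

-- ===== PRECONDITION & SPEC =====
def Spec_get_reg (pattern : String) (out : String) : Prop := out = get_reg_alt pattern
instance (pattern : String) (out : String) : Decidable (Spec_get_reg pattern out) := by unfold Spec_get_reg; infer_instance

-- ===== CLAIM =====
def Claim_equal_get_reg : Prop := ∀ (pattern : String), Dom_get_reg pattern → Spec_get_reg pattern (get_reg pattern)

-- ===== LEMMAS AND PROOFS =====

-- proof-side model of splitOn l [';']: (first segment, remaining segments)
def getRegSplit (l : List Char) : List Char × List (List Char) :=
  match l with
  | [] => ([], [])
  | c :: t =>
    if c = ';' then ([], (getRegSplit t).1 :: (getRegSplit t).2)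
    else (c :: (getRegSplit t).1, (getRegSplit t).2)

-- A's guarded per-segment escape, in one-pass form
def getRegSeg (p : List Char) : List Char :=
  if p.isEmpty || ['+', '-', '('].contains p.headI then p else p.flatMap getRegEscB

theorem getReg_splitOn_go_eq :
    ∀ (l : List Char) (fuel : Nat), l.length < fuel → ∀ (cur : List Char) (acc : List (List Char)),
      PySem.Chars.splitOn.go [';'] fuel l cur acc
        = acc.reverse ++ (cur.reverse ++ (getRegSplit l).1) :: (getRegSplit l).2 := by
  intro l
  induction l with
  | nil =>
    intro fuel _ cur acc
    cases fuel <;> rw [PySem.Chars.splitOn.go] <;> simp [getRegSplit]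
  | cons c t ih =>
    intro fuel h cur acc
    match fuel, h with
    | fuel + 1, h =>
      rw [PySem.Chars.splitOn.go]
      by_cases hc : c = ';'
      · subst hc
        rw [if_pos (by simp [List.isPrefixOf])]
        simp only [List.length_cons, List.drop_succ_cons, List.length_nil, List.drop_zero]
        rw [ih fuel (by simpa using h) [] (cur.reverse :: acc)]
        simp [getRegSplit]
      · rw [if_neg (by simp [List.isPrefixOf]; exact fun habs => hc habs.symm)]
        rw [ih fuel (by simpa using h) (c :: cur) acc]
        simp [getRegSplit, hc]

theorem getReg_splitOn_eq (l : List Char) :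
    PySem.Chars.splitOn l [';'] = (getRegSplit l).1 :: (getRegSplit l).2 := by
  rw [PySem.Chars.splitOn]
  rw [getReg_splitOn_go_eq l (l.length + 1) (by omega) [] []]
  simp

-- a .replace() whose needle is a single character is a one-character-at-a-time substitution
theorem getReg_replace_go_single (a : Char) (new : List Char) (l : List Char) :
    ∀ (fuel : Nat), l.length ≤ fuel → ∀ (acc : List Char),
      PySem.Chars.replace.go [a] new fuel l acc
        = acc.reverse ++ l.flatMap (fun c => if c = a then new else [c]) := by
  induction l with
  | nil =>
    intro fuel _ acc
    cases fuel <;> rw [PySem.Chars.replace.go] <;> simp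
  | cons c t ih =>
    intro fuel h acc
    match fuel, h with
    | fuel + 1, h =>
      rw [PySem.Chars.replace.go]
      by_cases hc : a = c
      · subst hc
        rw [if_pos (by simp [List.isPrefixOf])]
        simp only [List.length_cons, List.length_nil, List.drop_succ_cons, List.drop_zero]
        rw [ih fuel (by simpa using h) _]
        simp
      · rw [if_neg (by simp [List.isPrefixOf]; exact fun habs => hc habs)]
        rw [ih fuel (by simpa using h) _]
        have hca : c ≠ a := fun habs => hc habs.symm
        simp [hca]

theorem getReg_replace_single (cs : List Char) (a : Char) (new : List Char) :
    PySem.Chars.replace cs [a] new = cs.flatMap (fun c => if c = a then new else [c]) := by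
  rw [PySem.Chars.replace]
  simpa using getReg_replace_go_single a new cs cs.length le_rfl []

-- A's chain of ten replaces is one pass with B's table
theorem getReg_escA_eq (p : List Char) : getRegEscA p = p.flatMap getRegEscB := by
  simp only [getRegEscA, getReg_replace_single, List.flatMap_assoc]
  congr 1
  funext c
  by_cases h1 : c = '\\'
  · subst h1; decide
  by_cases h2 : c = '/'
  · subst h2; decide
  by_cases h3 : c = '['
  · subst h3; decide
  by_cases h4 : c = ']'
  · subst h4; decide
  by_cases h5 : c = '('
  · subst h5; decide
  by_cases h6 : c = ')'
  · subst h6; decide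
  by_cases h7 : c = '.'
  · subst h7; decide
  by_cases h8 : c = '*'
  · subst h8; decide
  by_cases h9 : c = '+'
  · subst h9; decide
  by_cases h10 : c = '_'
  · subst h10; decide
  simp [getRegEscB, h1, h2, h3, h4, h5, h6, h7, h8, h9, h10]

-- A's guarded escape of one segment equals getRegSeg
theorem getReg_seg_eq (p : List Char) :
    (if !p.isEmpty && !(['+', '-', '('].contains p.headI) then getRegEscA p else p)
      = getRegSeg p := by
  rw [getRegSeg, getReg_escA_eq,
    show (!p.isEmpty && !(['+', '-', '('].contains p.headI))
        = !(p.isEmpty || ['+', '-', '('].contains p.headI) from (Bool.not_or _ _).symm]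
  cases hb : p.isEmpty || ['+', '-', '('].contains p.headI <;> simp

-- A's "append each escaped segment plus ';'" written head/rest
theorem getReg_flatMap_seg :
    ∀ (r : List (List Char)) (h : List Char),
      (h :: r).flatMap (fun s => getRegSeg s ++ [';'])
        = (getRegSeg h ++ r.flatMap (fun s => ';' :: getRegSeg s)) ++ [';'] := by
  intro r
  induction r with
  | nil => intro h; simp
  | cons s rest ih =>
    intro h
    rw [List.flatMap_cons, ih s]
    simp

-- B's one pass computes the segmentwise escape
theorem getReg_goB_eq (l : List Char) :
    (∀ e : Bool, getRegGoB l false e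
        = (if e then (getRegSplit l).1 else (getRegSplit l).1.flatMap getRegEscB)
            ++ (getRegSplit l).2.flatMap (fun s => ';' :: getRegSeg s))
    ∧ getRegGoB l true false
        = getRegSeg (getRegSplit l).1
            ++ (getRegSplit l).2.flatMap (fun s => ';' :: getRegSeg s) := by
  induction l with
  | nil => exact ⟨fun e => by cases e <;> simp [getRegGoB, getRegSplit, getRegSeg], by
      simp [getRegGoB, getRegSplit, getRegSeg]⟩
  | cons c t ih =>
    by_cases hc : c = ';'
    · subst hc
      constructor
      · intro e
        rw [getRegGoB, if_pos rfl, ih.2]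
        cases e <;> simp [getRegSplit]
      · rw [getRegGoB, if_pos rfl, ih.2]
        simp [getRegSplit, getRegSeg]
    · have hsplit : getRegSplit (c :: t)
          = (c :: (getRegSplit t).1, (getRegSplit t).2) := by
        rw [getRegSplit, if_neg hc]
      constructor
      · intro e
        rw [getRegGoB, if_neg hc]
        show (if e = true then [c] else getRegEscB c) ++ getRegGoB t false e = _
        rw [ih.1 e, hsplit]
        cases e <;> simp
      · rw [getRegGoB, if_neg hc]
        show (if (['+', '-', '('].contains c) = true then [c] else getRegEscB c)
            ++ getRegGoB t false (['+', '-', '('].contains c) = _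
        rw [ih.1 (['+', '-', '('].contains c), hsplit]
        by_cases hm : c = '+' ∨ c = '-' ∨ c = '('
        · simp [getRegSeg, hm]
        · simp [getRegSeg, hm]

-- the trailing ';' is eaten by .strip(';')
theorem getReg_stripChars_semicolon (X : List Char) :
    PySem.Chars.stripChars (X ++ [';']) [';'] = PySem.Chars.stripChars X [';'] := by
  simp only [PySem.Chars.stripChars]
  rw [List.dropWhile_append]
  by_cases h : (List.dropWhile (fun c => [';'].contains c) X).isEmpty
  · rw [if_pos h]
    rw [List.isEmpty_iff] at h
    have h' : List.dropWhile (fun c => decide (c = ';')) X = [] := by simpa using h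
    simp [h']
  · rw [if_neg h]
    simp

-- .rstrip() after .strip() is a no-op
theorem getReg_rstrip_strip (s : List Char) :
    PySem.Chars.rstrip (PySem.Chars.strip s) = PySem.Chars.strip s := by
  simp [PySem.Chars.strip, PySem.Chars.rstrip, List.dropWhile_idempotent]

-- ===== VERDICT =====
theorem get_reg_spec : Claim_equal_get_reg := by
  intro pattern _
  unfold Spec_get_reg get_reg get_reg_alt
  simp only [PySem.List.foldl_append_eq_flatMap, List.nil_append]
  have hbody :
      (PySem.Chars.splitOn pattern.toList [';']).flatMap
          (fun patt =>
            (if !patt.isEmpty && !(['+', '-', '('].contains patt.headI)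
              then getRegEscA patt else patt) ++ [';'])
        = getRegGoB pattern.toList true false ++ [';'] := by
    rw [getReg_splitOn_eq]
    simp only [getReg_seg_eq]
    rw [getReg_flatMap_seg, (getReg_goB_eq pattern.toList).2]
  rw [hbody, getReg_stripChars_semicolon, getReg_rstrip_strip]
  have hiff :
      (PySem.Chars.find
          (PySem.Chars.strip (PySem.Chars.stripChars (getRegGoB pattern.toList true false) [';'])) ['^'] = -1 ∧
        PySem.Chars.find
          (PySem.Chars.strip (PySem.Chars.stripChars (getRegGoB pattern.toList true false) [';'])) ['$'] = -1)
      ↔ (PySem.Chars.isIn ['^']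
            (PySem.Chars.strip (PySem.Chars.stripChars (getRegGoB pattern.toList true false) [';'])) ||
          PySem.Chars.isIn ['$']
            (PySem.Chars.strip (PySem.Chars.stripChars (getRegGoB pattern.toList true false) [';']))) = false := by
    rw [Bool.or_eq_false_iff, PySem.Chars.find_eq_neg_one_iff, PySem.Chars.find_eq_neg_one_iff,
        PySem.Chars.isIn_eq_false_iff, PySem.Chars.isIn_eq_false_iff]
  by_cases h : PySem.Chars.find
      (PySem.Chars.strip (PySem.Chars.stripChars (getRegGoB pattern.toList true false) [';'])) ['^'] = -1 ∧
      PySem.Chars.find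
        (PySem.Chars.strip (PySem.Chars.stripChars (getRegGoB pattern.toList true false) [';'])) ['$'] = -1
  · rw [if_pos h, if_neg (by rw [hiff.mp h]; simp)]
  · rw [if_neg h]
    have hb : (PySem.Chars.isIn ['^']
          (PySem.Chars.strip (PySem.Chars.stripChars (getRegGoB pattern.toList true false) [';'])) ||
        PySem.Chars.isIn ['$']
          (PySem.Chars.strip (PySem.Chars.stripChars (getRegGoB pattern.toList true false) [';']))) = true := by
      cases hx : (PySem.Chars.isIn ['^']
          (PySem.Chars.strip (PySem.Chars.stripChars (getRegGoB pattern.toList true false) [';'])) ||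
        PySem.Chars.isIn ['$']
          (PySem.Chars.strip (PySem.Chars.stripChars (getRegGoB pattern.toList true false) [';'])))
      · exact absurd (hiff.mpr hx) h
      · rfl
    rw [if_pos hb]
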